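-- pv_equiv track=rewrite | github.com/LnC-Study/Acmicpc-net | __Samsung swexpert/7701 염라대왕의 이름 정렬/kmj_python.py | solution
-- ===== SOURCE A (Python) =====
-- from queue import PriorityQueue
--
-- def solution(arr):
--     answer = list()
--     # 중복 제거
--     processed_arr = list(set(arr))
--
--     # 우선순위 큐에 삽입
--     queue = PriorityQueue(maxsize=len(processed_arr))
--     for word in processed_arr:
--         queue.put((len(word), word))
--
--     # 우선순위 큐에서 제거 -> 길이 짧은순, 사전순으로 제거됨.
--     for _ in range(len(processed_arr)):
--         item = queue.get()[1]
--         answer.append(item)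
--     return answer
-- ===== SOURCE B (Python) =====
-- def solution(arr):
--     return sorted(set(arr), key=lambda w: (len(w), w))
-- ===== Notes on version B (the rewrite author's own statement) =====
-- stated objective: idiomatic
-- what changed: Replaces the PriorityQueue insert-all/extract-all two-loop structure with a single sorted() call over the deduplicated set using the (len, word) key.
import Mathlib
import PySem

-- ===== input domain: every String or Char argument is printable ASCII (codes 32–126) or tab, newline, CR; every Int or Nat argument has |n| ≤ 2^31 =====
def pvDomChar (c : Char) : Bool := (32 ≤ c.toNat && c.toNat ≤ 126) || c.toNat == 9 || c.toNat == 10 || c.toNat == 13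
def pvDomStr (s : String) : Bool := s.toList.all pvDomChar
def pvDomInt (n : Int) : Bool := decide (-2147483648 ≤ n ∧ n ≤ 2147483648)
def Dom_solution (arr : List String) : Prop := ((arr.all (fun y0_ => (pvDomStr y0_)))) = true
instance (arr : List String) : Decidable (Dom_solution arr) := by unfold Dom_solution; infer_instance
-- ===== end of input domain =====

-- B replaces A's PriorityQueue insert-all-then-extract-all loops with one sorted() call (idiomatic).

-- ===== PORT A =====
-- PriorityQueue on (len, word) tuples, modelled by its observable semantics:
-- put = ordered insertion by Python's lexicographic tuple order, get = pop the minimum (head).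
def pqPut (q : List (Int × String)) (item : Int × String) : List (Int × String) :=
  PySem.List.insertBy (fun a b => decide (toLex a < toLex b)) item q

-- the second for-loop: 'for _ in range(n): answer.append(queue.get()[1])'
def pqDrain : Nat → List (Int × String) → List String → List String
  | 0, _, ans => ans
  | _ + 1, [], ans => ans
  | n + 1, it :: q, ans => pqDrain n q (ans ++ [it.2])

def solution (arr : List String) : List String :=
  let processed := PySem.Set.ofList arr
  let queue := processed.foldl (fun q w => pqPut q ((w.length : Int), w)) []
  pqDrain processed.length queue []

-- ===== PORT B =====
-- sorted(set(arr), key=lambda w: (len(w), w)); toLex gives Python's lexicographic tuple order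
def solution_alt (arr : List String) : List String :=
  PySem.List.sorted (PySem.Set.ofList arr) (fun w => toLex ((w.length : Int), w))

-- ===== PRECONDITION & SPEC =====
def Spec_solution (arr : List String) (out : List String) : Prop := out = solution_alt arr
instance (arr : List String) (out : List String) : Decidable (Spec_solution arr out) := by unfold Spec_solution; infer_instance

-- ===== CLAIM (what is proved, stated in full; the proofs are below) =====
def Claim_equal_solution : Prop := ∀ (arr : List String), Dom_solution arr → Spec_solution arr (solution arr)

-- ===== LEMMAS AND PROOFS =====

def pvF (w : String) : Int × String := ((w.length : Int), w)

lemma pvF_injective : Function.Injective pvF := by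
  intro a b h
  simpa [pvF] using congrArg Prod.snd h

lemma pqDrain_eq (q : List (Int × String)) (acc : List String) :
    pqDrain q.length q acc = acc ++ q.map Prod.snd := by
  induction q generalizing acc with
  | nil => simp [pqDrain]
  | cons it t ih => simp [pqDrain, ih]

lemma queue_eq (l : List String) :
    l.foldl (fun q w => pqPut q ((w.length : Int), w)) []
      = PySem.List.sorted (l.map pvF) (fun p => toLex p) := by
  rw [PySem.List.sorted_eq_foldl_insertBy, List.foldl_map]
  rfl

theorem solution_eq_alt (arr : List String) : solution arr = solution_alt arr := by
  unfold solution solution_alt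
  set S := PySem.Set.ofList arr with hS
  set sortedQ := PySem.List.sorted (S.map pvF) (fun p => toLex p) with hQ
  have hperm : sortedQ.Perm (S.map pvF) := PySem.List.sorted_perm _ _ _
  have hlen : S.length = sortedQ.length := by
    rw [hperm.length_eq, List.length_map]
  have hsndmap : (S.map pvF).map Prod.snd = S := by
    simp [pvF, List.map_map, Function.comp_def]
  have hysperm : (sortedQ.map Prod.snd).Perm S := by
    simpa [hsndmap] using hperm.map Prod.snd
  -- strictness from nodup
  have hnd : sortedQ.Nodup := hperm.nodup_iff.mpr
    ((PySem.Set.nodup_ofList arr).map pvF_injective)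
  have hle : sortedQ.Pairwise (fun a b => toLex a ≤ toLex b) :=
    PySem.List.sorted_pairwise _ _
  have hlt : sortedQ.Pairwise (fun a b => toLex a < toLex b) := by
    have := List.Pairwise.and hnd hle
    exact this.imp (fun h => lt_of_le_of_ne h.2 (fun he => h.1 (toLex.injective he)))
  -- members of sortedQ are of the form pvF w, hence p = pvF p.2
  have hfix : ∀ p ∈ sortedQ, pvF p.2 = p := by
    intro p hp
    have : p ∈ S.map pvF := (PySem.List.mem_sorted _ _ _ _).mp hp
    rcases List.mem_map.mp this with ⟨w, _, rfl⟩
    rfl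
  have hpw : (sortedQ.map Prod.snd).Pairwise
      (fun a b => (fun w => toLex ((w.length : Int), w)) a < (fun w => toLex ((w.length : Int), w)) b) := by
    rw [List.pairwise_map]
    refine hlt.imp_of_mem ?_
    intro a b ha hb h
    have h1 : toLex (pvF a.2) < toLex (pvF b.2) := by rw [hfix a ha, hfix b hb]; exact h
    simpa [pvF] using h1
  have hmain := PySem.List.sorted_eq_of_perm_of_pairwise_lt S (sortedQ.map Prod.snd)
    (fun w => toLex ((w.length : Int), w)) hysperm hpw
  show pqDrain S.length (List.foldl (fun q w => pqPut q ((w.length : Int), w)) [] S) [] = _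
  rw [queue_eq, ← hQ, hlen, pqDrain_eq, hmain]
  simp

-- ===== VERDICT (by name: the statement is the Claim_ definition above) =====
theorem solution_spec : Claim_equal_solution := by
  intro arr _
  exact solution_eq_alt arr
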